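-- pv_equiv track=rewrite | github.com/kelvinhuang0327/number-pattern-research | tools/backtest_power_pp3v2_comprehensive.py | bet3_z3_gap
-- ===== SOURCE A (Python) =====
-- from collections import Counter
--
-- MAX_NUM = 38
--
-- def bet3_echo_cold(history, exclude):
--     """原始 PP3 Bet3: Lag-2 Echo + Cold Fill"""
--     echo_nums = []
--     if len(history) >= 2:
--         echo_nums = [n for n in history[-2]['numbers'] if n <= MAX_NUM and n not in exclude]
--     recent = history[-100:]
--     freq = Counter([n for d in recent for n in d['numbers'] if n <= MAX_NUM])
--     remaining = [n for n in range(1, MAX_NUM + 1) if n not in exclude and n not in echo_nums]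
--     remaining.sort(key=lambda x: freq.get(x, 0))
--     return sorted((echo_nums + remaining)[:6])
--
-- def bet3_z3_gap(history, exclude, lookback=30):
--     """Z3 Gap 注入 Bet3: 選 Z3(26-38) 中 gap 最大的號碼"""
--     z3_nums = [n for n in range(26, MAX_NUM + 1) if n not in exclude]
--     if not z3_nums:
--         # Z3 全被占用，fallback 到 cold
--         return bet3_echo_cold(history, exclude)
--
--     # 計算每個 Z3 號碼的 gap（距離上次出現的期數）
--     recent = history[-lookback:] if len(history) >= lookback else history
--     last_seen = {}
--     for i, d in enumerate(recent):
--         for n in d['numbers']: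
--             if n <= MAX_NUM:
--                 last_seen[n] = i
--     L = len(recent)
--     gaps = {}
--     for n in z3_nums:
--         if n in last_seen:
--             gaps[n] = (L - 1) - last_seen[n]
--         else:
--             gaps[n] = L  # 從未出現，gap = 窗口長度
--
--     z3_sorted = sorted(z3_nums, key=lambda x: -gaps[x])
--
--     # 盡量取 Z3 高 Gap 號碼，不夠則用 all-domain gap 補足
--     bet = z3_sorted[:6]
--     if len(bet) < 6:
--         non_z3 = [n for n in range(1, MAX_NUM + 1) if n not in exclude and n not in set(bet)]
--         non_z3_gaps = {}
--         for n in non_z3: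
--             if n in last_seen:
--                 non_z3_gaps[n] = (L - 1) - last_seen[n]
--             else:
--                 non_z3_gaps[n] = L
--         non_z3_sorted = sorted(non_z3, key=lambda x: -non_z3_gaps[x])
--         bet = sorted((bet + non_z3_sorted)[:6])
--     return sorted(bet[:6])
-- ===== SOURCE B (Python) =====
-- MAX_NUM = 38
--
--
-- def _peel(cands, key):
--     # selection order: repeatedly peel off all candidates carrying the current
--     # largest key value; candidates are scanned in their given (ascending) order
--     if not cands:
--         return []
--     m = max(key(n) for n in cands)
--     hit = [n for n in cands if key(n) == m]
--     rest = [n for n in cands if key(n) != m]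
--     return hit + _peel(rest, key)
--
--
-- def _bet3_cold(history, exclude):
--     # fallback when all of Z3 is excluded: lag-2 echo + least-frequent fill
--     echo = []
--     if len(history) >= 2:
--         echo = [n for n in history[-2]['numbers'] if n <= MAX_NUM and n not in exclude]
--     recent = history[-100:]
--
--     def cnt(n):
--         return sum(d['numbers'].count(n) for d in recent)
--
--     remaining = [n for n in range(1, MAX_NUM + 1) if n not in exclude and n not in echo]
--     return sorted((echo + _peel(remaining, lambda n: -cnt(n)))[:6])
--
--
-- def bet3_z3_gap(history, exclude, lookback=30):
--     recent = history[-lookback:] if len(history) >= lookback else history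
--
--     def gap(n):
--         # steps back to the most recent draw containing n; len(recent) if absent
--         g = 0
--         for d in reversed(recent):
--             if n in d['numbers']:
--                 return g
--             g += 1
--         return g
--
--     z3 = [n for n in range(26, MAX_NUM + 1) if n not in exclude]
--     if not z3:
--         return _bet3_cold(history, exclude)
--
--     bet = _peel(z3, gap)[:6]
--     if len(bet) < 6:
--         rest = [n for n in range(1, MAX_NUM + 1) if n not in exclude and n not in bet]
--         bet = sorted((bet + _peel(rest, gap))[:6])
--     return sorted(bet[:6])
-- ===== Notes on version B (the rewrite author's own statement) =====
-- stated objective: alternative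
-- what changed: Replaces the forward last_seen index table plus key-sorts by a per-number backward scan for the gap and a selection-style peel (repeatedly extract all candidates with the current best key) instead of any sort, in both the Z3 path and the cold fallback.
import Mathlib
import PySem

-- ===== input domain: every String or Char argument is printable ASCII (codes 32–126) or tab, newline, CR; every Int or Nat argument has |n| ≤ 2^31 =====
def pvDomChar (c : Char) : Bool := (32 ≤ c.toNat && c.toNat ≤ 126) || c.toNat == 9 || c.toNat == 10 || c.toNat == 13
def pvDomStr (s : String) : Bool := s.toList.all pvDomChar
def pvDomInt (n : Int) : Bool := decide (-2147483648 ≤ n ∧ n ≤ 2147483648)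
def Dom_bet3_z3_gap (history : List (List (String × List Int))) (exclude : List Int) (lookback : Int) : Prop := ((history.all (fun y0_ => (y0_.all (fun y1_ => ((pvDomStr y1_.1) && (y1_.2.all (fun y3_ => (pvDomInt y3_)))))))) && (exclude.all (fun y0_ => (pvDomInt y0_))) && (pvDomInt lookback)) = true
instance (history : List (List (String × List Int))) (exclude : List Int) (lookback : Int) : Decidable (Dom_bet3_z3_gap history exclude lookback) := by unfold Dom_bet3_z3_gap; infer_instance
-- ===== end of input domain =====

-- B replaces A's forward `last_seen` index table and its two stable key-sorts by a
-- per-number backward scan for the gap and a selection-style peel (repeatedly extract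
-- all candidates with the current best key) — an alternative algorithm of similar cost.

-- d['numbers'] : first-match lookup; the `.getD []` default is never reached inside
-- Pre_bet3_z3_gap (Python raises KeyError exactly where this lookup is `none`).
def pvNums (d : List (String × List Int)) : List Int :=
  ((PySem.Dict.mk d).get? "numbers").getD []

-- ===== PORT A =====

-- bet3_echo_cold (A's fallback helper, transliterated)
def pvEchoCold (history : List (List (String × List Int))) (exclude : List Int) : List Int :=
  let echo_nums :=
    if 2 ≤ (history.length : Int) then
      (pvNums ((PySem.List.pyGet? history (-2)).getD [])).filter
        (fun n => decide (n ≤ 38) && !(decide (n ∈ exclude)))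
    else []
  let recent := PySem.List.slice history (some (-100)) none
  let freq := PySem.Dict.counter (recent.flatMap (fun d => (pvNums d).filter (fun n => decide (n ≤ 38))))
  let remaining := (PySem.List.pyRange 1 39 1).filter
    (fun n => !(decide (n ∈ exclude)) && !(decide (n ∈ echo_nums)))
  -- remaining.sort(key=lambda x: freq.get(x, 0))  (stable)
  let remaining := PySem.List.sorted remaining (fun x => PySem.Dict.getD freq x 0) false
  PySem.List.sorted (PySem.List.slice (echo_nums ++ remaining) none (some 6)) (fun x => x) false

def bet3_z3_gap (history : List (List (String × List Int))) (exclude : List Int) (lookback : Int) : List Int :=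
  let z3_nums := (PySem.List.pyRange 26 39 1).filter (fun n => !(decide (n ∈ exclude)))
  if z3_nums = [] then pvEchoCold history exclude
  else
    let recent := if lookback ≤ (history.length : Int) then PySem.List.slice history (some (-lookback)) none else history
    let last_seen := (PySem.List.enumerate recent).foldl
      (fun ls p => (pvNums p.2).foldl (fun ls n => if n ≤ 38 then ls.insert n p.1 else ls) ls)
      PySem.Dict.empty
    let L : Int := (recent.length : Int)
    -- gaps[n]: the key is always present when it is read, so `.getD` is the exact lookup
    let gaps := z3_nums.foldl
      (fun g n => if last_seen.contains n then g.insert n (L - 1 - PySem.Dict.getD last_seen n 0) else g.insert n L)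
      PySem.Dict.empty
    let z3_sorted := PySem.List.sorted z3_nums (fun x => -(PySem.Dict.getD gaps x 0)) false
    let bet := PySem.List.slice z3_sorted none (some 6)
    let bet :=
      if bet.length < 6 then
        let non_z3 := (PySem.List.pyRange 1 39 1).filter
          (fun n => !(decide (n ∈ exclude)) && !(decide (n ∈ PySem.Set.ofList bet)))
        let non_z3_gaps := non_z3.foldl
          (fun g n => if last_seen.contains n then g.insert n (L - 1 - PySem.Dict.getD last_seen n 0) else g.insert n L)
          PySem.Dict.empty
        let non_z3_sorted := PySem.List.sorted non_z3 (fun x => -(PySem.Dict.getD non_z3_gaps x 0)) false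
        PySem.List.sorted (PySem.List.slice (bet ++ non_z3_sorted) none (some 6)) (fun x => x) false
      else bet
    PySem.List.sorted (PySem.List.slice bet none (some 6)) (fun x => x) false

-- ===== PORT B =====

-- the peeled-off sub-list is strictly shorter (the max of the keys is attained);
-- cited by pvPeel's decreasing_by
theorem pvFilterNe_lt (key : Int → Int) (c : Int) (cs : List Int) :
    ((c :: cs).filter (fun n => !(key n == cs.foldl (fun acc n => max acc (key n)) (key c)))).length
      < (c :: cs).length := by
  apply List.length_filter_lt_length_iff_exists.mpr
  rcases PySem.List.foldl_max_mem (cs.map key) (key c) with h | h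
  · exact ⟨c, List.mem_cons_self, by simp [List.foldl_map] at h ⊢; omega⟩
  · rw [List.mem_map] at h
    obtain ⟨n, hn, hkn⟩ := h
    exact ⟨n, List.mem_cons_of_mem _ hn, by simp [List.foldl_map] at hkn ⊢; omega⟩

-- _peel(cands, key): repeatedly peel off all candidates with the current largest key
def pvPeel (key : Int → Int) (cands : List Int) : List Int :=
  match cands with
  | [] => []
  | c :: cs =>
    let m := cs.foldl (fun acc n => max acc (key n)) (key c)   -- max(key(n) for n in cands)
    ((c :: cs).filter (fun n => key n == m)) ++ pvPeel key ((c :: cs).filter (fun n => !(key n == m)))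
termination_by cands.length
decreasing_by
  simp
  have h := pvFilterNe_lt key c cs
  simp only [List.length_cons] at h
  omega

-- gap(n): steps back to the most recent draw containing n (loop over reversed(recent))
def pvGap (recentRev : List (List (String × List Int))) (n : Int) (g : Int) : Int :=
  match recentRev with
  | [] => g
  | d :: ds => if (pvNums d).contains n then g else pvGap ds n (g + 1)

-- _bet3_cold (B's fallback helper)
def pvCold (history : List (List (String × List Int))) (exclude : List Int) : List Int :=
  let echo :=
    if 2 ≤ (history.length : Int) then
      (pvNums ((PySem.List.pyGet? history (-2)).getD [])).filter
        (fun n => decide (n ≤ 38) && !(decide (n ∈ exclude)))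
    else []
  let recent := PySem.List.slice history (some (-100)) none
  let cnt := fun n => (recent.map (fun d => ((pvNums d).count n : Int))).sum
  let remaining := (PySem.List.pyRange 1 39 1).filter
    (fun n => !(decide (n ∈ exclude)) && !(decide (n ∈ echo)))
  PySem.List.sorted (PySem.List.slice (echo ++ pvPeel (fun n => -(cnt n)) remaining) none (some 6)) (fun x => x) false

def bet3_z3_gap_alt (history : List (List (String × List Int))) (exclude : List Int) (lookback : Int) : List Int :=
  let recent := if lookback ≤ (history.length : Int) then PySem.List.slice history (some (-lookback)) none else history
  let gap := fun n => pvGap recent.reverse n 0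
  let z3 := (PySem.List.pyRange 26 39 1).filter (fun n => !(decide (n ∈ exclude)))
  if z3 = [] then pvCold history exclude
  else
    let bet := PySem.List.slice (pvPeel gap z3) none (some 6)
    let bet :=
      if bet.length < 6 then
        let rest := (PySem.List.pyRange 1 39 1).filter
          (fun n => !(decide (n ∈ exclude)) && !(decide (n ∈ bet)))
        PySem.List.sorted (PySem.List.slice (bet ++ pvPeel gap rest) none (some 6)) (fun x => x) false
      else bet
    PySem.List.sorted (PySem.List.slice bet none (some 6)) (fun x => x) false

-- ===== PRECONDITION & SPEC =====

-- Pre_ excludes exactly the inputs where Python A raises KeyError: a draw dict without the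
-- key "numbers" inside the window A actually reads (the lookback window on the Z3 path,
-- the last-100 window on the fallback path).
def Pre_bet3_z3_gap (history : List (List (String × List Int))) (exclude : List Int) (lookback : Int) : Prop :=
  if (PySem.List.pyRange 26 39 1).filter (fun n => !(decide (n ∈ exclude))) = [] then
    ∀ d ∈ PySem.List.slice history (some (-100)) none, ((PySem.Dict.mk d).get? "numbers").isSome
  else
    ∀ d ∈ (if lookback ≤ (history.length : Int) then PySem.List.slice history (some (-lookback)) none else history),
      ((PySem.Dict.mk d).get? "numbers").isSome

instance (history : List (List (String × List Int))) (exclude : List Int) (lookback : Int) : Decidable (Pre_bet3_z3_gap history exclude lookback) := by unfold Pre_bet3_z3_gap; infer_instance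

def pvWitness_bet3_z3_gap : (List (List (String × List Int))) × List Int × Int :=
  ([[("numbers", [26, 3])], [("numbers", [38])]], [27], 30)

def Spec_bet3_z3_gap (history : List (List (String × List Int))) (exclude : List Int) (lookback : Int) (out : List Int) : Prop := out = bet3_z3_gap_alt history exclude lookback
instance (history : List (List (String × List Int))) (exclude : List Int) (lookback : Int) (out : List Int) : Decidable (Spec_bet3_z3_gap history exclude lookback out) := by unfold Spec_bet3_z3_gap; infer_instance

-- ===== CLAIM (what is proved, stated in full; the proofs are below) =====
def Claim_equal_bet3_z3_gap : Prop := ∀ (history : List (List (String × List Int))) (exclude : List Int) (lookback : Int), Dom_bet3_z3_gap history exclude lookback → Pre_bet3_z3_gap history exclude lookback → Spec_bet3_z3_gap history exclude lookback (bet3_z3_gap history exclude lookback)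

-- ===== LEMMAS AND PROOFS =====

-- `n in set(bet)` is `n in bet`
theorem pvMem_ofList (bet : List Int) (n : Int) :
    decide (n ∈ PySem.Set.ofList bet) = decide (n ∈ bet) := by
  by_cases h : n ∈ bet <;> simp [PySem.Set.mem_ofList, h]

theorem pvContains_eq {κ ν : Type} [BEq κ] (d : PySem.Dict κ ν) (k : κ) :
    d.contains k = (d.get? k).isSome := by
  simp [PySem.Dict.contains, PySem.Dict.get?, List.isSome_find?]

theorem pvRange139 : ∀ x ∈ PySem.List.pyRange 1 39 1, 0 < x ∧ x < 39 := by decide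

theorem pvRange139_pairwise : (PySem.List.pyRange 1 39 1).Pairwise (· < ·) := by decide

theorem pvRange2639 : ∀ x ∈ PySem.List.pyRange 26 39 1, 0 < x ∧ x < 39 := by decide

theorem pvRange2639_pairwise : (PySem.List.pyRange 26 39 1).Pairwise (· < ·) := by decide

-- ---- gap scan facts ----

theorem pvGap_nil (n g : Int) : pvGap [] n g = g := rfl

theorem pvGap_cons (d : List (String × List Int)) (ds : List (List (String × List Int))) (n g : Int) :
    pvGap (d :: ds) n g = if (pvNums d).contains n then g else pvGap ds n (g + 1) := rfl

theorem pvGap_shift (ds : List (List (String × List Int))) (n : Int) :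
    ∀ g, pvGap ds n g = g + pvGap ds n 0 := by
  induction ds with
  | nil => intro g; simp [pvGap_nil]
  | cons d ds ih =>
      intro g
      rw [pvGap_cons, pvGap_cons]
      by_cases h : (pvNums d).contains n = true
      · rw [if_pos h, if_pos h]; omega
      · rw [if_neg h, if_neg h, ih (g + 1), ih (0 + 1)]; omega

theorem pvGap_bounds (ds : List (List (String × List Int))) (n : Int) :
    0 ≤ pvGap ds n 0 ∧ pvGap ds n 0 ≤ (ds.length : Int) := by
  induction ds with
  | nil => simp [pvGap_nil]
  | cons d ds ih =>
      rw [pvGap_cons]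
      simp only [List.length_cons]
      by_cases h : (pvNums d).contains n = true
      · rw [if_pos h]; omega
      · rw [if_neg h, pvGap_shift ds n (0 + 1)]; omega

theorem pvGap_append (xs : List (List (String × List Int))) (d : List (String × List Int)) (n : Int) :
    pvGap (xs ++ [d]) n 0 =
      if pvGap xs n 0 < (xs.length : Int) then pvGap xs n 0
      else if (pvNums d).contains n then (xs.length : Int) else (xs.length : Int) + 1 := by
  induction xs with
  | nil =>
      by_cases hd : (pvNums d).contains n = true <;>
        simp [pvGap_cons, pvGap_nil, hd]
  | cons x xs ih =>
      rw [List.cons_append, pvGap_cons, pvGap_cons,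
        pvGap_shift (xs ++ [d]) n (0 + 1), pvGap_shift xs n (0 + 1), ih]
      have hb := pvGap_bounds xs n
      simp only [List.length_cons]
      by_cases hx : (pvNums x).contains n = true <;>
        by_cases hd : (pvNums d).contains n = true <;>
          simp only [hx, hd, if_true] <;> split_ifs <;> omega

-- ---- A's last_seen table, characterised by the backward gap scan ----

theorem pvInner_get? (nums : List Int) (i : Int) (n : Int) (hn : n ≤ 38) :
    ∀ ls : PySem.Dict Int Int,
      ((nums.foldl (fun ls n' => if n' ≤ 38 then ls.insert n' i else ls) ls).get? n)
        = if n ∈ nums then some i else ls.get? n := by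
  induction nums with
  | nil => intro ls; simp
  | cons m rest ih =>
      intro ls
      simp only [List.foldl_cons]
      rw [ih]
      by_cases hmem : n ∈ rest
      · simp [hmem]
      · by_cases hmn : m = n
        · subst hmn
          simp [hmem, if_pos hn, PySem.Dict.get?_insert_self]
        · have hne : n ≠ m := fun hc => hmn hc.symm
          by_cases hm38 : m ≤ 38 <;>
            simp [hm38, hmem, Ne.symm hmn, PySem.Dict.get?_insert_of_ne _ _ hne]

theorem pvLastSeen_get? (recent : List (List (String × List Int))) (n : Int) (hn : n ≤ 38) :
    ∀ (s : Int) (ls : PySem.Dict Int Int),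
      (((PySem.List.enumerate recent s).foldl
          (fun ls p => (pvNums p.2).foldl (fun ls n' => if n' ≤ 38 then ls.insert n' p.1 else ls) ls) ls).get? n)
        = if pvGap recent.reverse n 0 < (recent.length : Int)
          then some (s + (recent.length : Int) - 1 - pvGap recent.reverse n 0)
          else ls.get? n := by
  induction recent with
  | nil => intro s ls; simp [PySem.List.enumerate, pvGap_nil]
  | cons d ds ih =>
      intro s ls
      have henum : PySem.List.enumerate (d :: ds) s = (s, d) :: PySem.List.enumerate ds (s + 1) := rfl
      rw [henum]
      simp only [List.foldl_cons]
      rw [ih (s + 1), pvInner_get? _ _ _ hn]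
      have hrev : (d :: ds).reverse = ds.reverse ++ [d] := by simp
      rw [hrev, pvGap_append]
      have hb := pvGap_bounds ds.reverse n
      simp only [List.length_reverse] at hb ⊢
      simp only [List.length_cons]
      by_cases hd : n ∈ pvNums d
      · have hcont : (pvNums d).contains n = true := by simpa using hd
        simp only [hcont, if_true, hd]
        split_ifs <;> first | rfl | (congr 1; omega) | omega | (exfalso; omega)
      · have hcont : ¬ ((pvNums d).contains n = true) := by simpa using hd
        simp only [hcont, if_false, hd]
        split_ifs <;> first | rfl | (congr 1; omega) | omega | (exfalso; omega)

-- ---- getD of an insert-only fold whose value depends only on the key ----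

theorem pvGetD_foldl_insert (v : Int → Int) (x : Int) :
    ∀ (xs : List Int) (g0 : PySem.Dict Int Int),
      ((xs.foldl (fun g n => g.insert n (v n)) g0).getD x 0)
        = if x ∈ xs then v x else g0.getD x 0 := by
  intro xs
  induction xs with
  | nil => intro g0; simp
  | cons m rest ih =>
      intro g0
      simp only [List.foldl_cons]
      rw [ih]
      by_cases hmem : x ∈ rest
      · simp [hmem]
      · by_cases hxm : x = m
        · subst hxm
          simp [hmem, PySem.Dict.getD, PySem.Dict.get?_insert_self]
        · simp [hmem, hxm, PySem.Dict.getD, PySem.Dict.get?_insert_of_ne _ _ hxm]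

-- A's per-candidate gap table, read back at a candidate, equals B's backward gap scan
theorem pvGapsDict_getD (L : Int) (ls : PySem.Dict Int Int) (gapf : Int → Int) (x : Int)
    (hget : ls.get? x = if gapf x < L then some (L - 1 - gapf x) else none)
    (hbnd : 0 ≤ gapf x ∧ gapf x ≤ L)
    (xs : List Int) (hx : x ∈ xs) :
    PySem.Dict.getD
      (xs.foldl (fun g n =>
          if ls.contains n then g.insert n (L - 1 - PySem.Dict.getD ls n 0) else g.insert n L)
        PySem.Dict.empty) x 0
      = gapf x := by
  have hfun : (fun (g : PySem.Dict Int Int) n =>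
        if ls.contains n then g.insert n (L - 1 - PySem.Dict.getD ls n 0) else g.insert n L)
      = fun (g : PySem.Dict Int Int) n =>
        g.insert n (if ls.contains n then L - 1 - PySem.Dict.getD ls n 0 else L) := by
    funext g n
    by_cases h : ls.contains n = true
    · rw [if_pos h, if_pos h]
    · rw [if_neg h, if_neg h]
  rw [hfun, pvGetD_foldl_insert, if_pos hx]
  rw [pvContains_eq, hget]
  by_cases h1 : gapf x < L
  · rw [if_pos h1]
    simp only [Option.isSome_some, if_true]
    have hgd : PySem.Dict.getD ls x 0 = L - 1 - gapf x := by
      simp [PySem.Dict.getD, hget, if_pos h1]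
    rw [hgd]
    omega
  · rw [if_neg h1]
    simp only [Option.isSome_none, Bool.false_eq_true, if_false]
    omega

-- ---- stability of A's key-sort: strict pairwise order on key*39 + id ----

theorem pvInsertBy_pairwise (k : Int → Int) (x : Int) :
    ∀ acc : List Int,
      acc.Pairwise (fun a b => k a * 39 + a < k b * 39 + b) →
      (∀ y ∈ acc, 0 < y ∧ y < 39) → (0 < x ∧ x < 39) →
      (∀ y ∈ acc, y < x) →
      (PySem.List.insertBy (fun a b => decide (k a < k b)) x acc).Pairwise
        (fun a b => k a * 39 + a < k b * 39 + b) := by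
  intro acc
  induction acc with
  | nil => intro _ _ _ _; simp [PySem.List.insertBy]
  | cons y t ih =>
      intro hacc hb hx hlt
      rw [List.pairwise_cons] at hacc
      simp only [PySem.List.insertBy]
      by_cases hkxy : k x < k y
      · rw [if_pos (by simpa using hkxy)]
        refine List.pairwise_cons.mpr ⟨?_, List.pairwise_cons.mpr hacc⟩
        intro z hz
        rcases List.mem_cons.mp hz with rfl | hzt
        · have hby := hb z List.mem_cons_self
          omega
        · have hyz := hacc.1 z hzt
          have hby := hb y List.mem_cons_self
          have hbz := hb z (List.mem_cons_of_mem _ hzt)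
          omega
      · rw [if_neg (by simpa using hkxy)]
        refine List.pairwise_cons.mpr ⟨?_, ?_⟩
        · intro z hz
          rcases (PySem.List.mem_insertBy _ _ _ _).mp hz with rfl | hzt
          · have hby := hb y List.mem_cons_self
            have hyx := hlt y List.mem_cons_self
            omega
          · exact hacc.1 z hzt
        · exact ih hacc.2 (fun y' hy' => hb y' (List.mem_cons_of_mem _ hy')) hx
            (fun y' hy' => hlt y' (List.mem_cons_of_mem _ hy'))

theorem pvFoldl_insertBy_pairwise (k : Int → Int) :
    ∀ (xs acc : List Int),
      acc.Pairwise (fun a b => k a * 39 + a < k b * 39 + b) →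
      (∀ y ∈ acc, 0 < y ∧ y < 39) → (∀ x ∈ xs, 0 < x ∧ x < 39) →
      xs.Pairwise (· < ·) → (∀ y ∈ acc, ∀ x ∈ xs, y < x) →
      (xs.foldl (fun acc x => PySem.List.insertBy (fun a b => decide (k a < k b)) x acc) acc).Pairwise
        (fun a b => k a * 39 + a < k b * 39 + b) := by
  intro xs
  induction xs with
  | nil => intro acc h _ _ _ _; exact h
  | cons x xs ih =>
      intro acc hacc hbacc hbxs hpxs hlt
      rw [List.pairwise_cons] at hpxs
      simp only [List.foldl_cons]
      apply ih
      · exact pvInsertBy_pairwise k x acc hacc hbacc (hbxs x List.mem_cons_self)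
          (fun y hy => hlt y hy x List.mem_cons_self)
      · intro y hy
        rcases (PySem.List.mem_insertBy _ _ _ _).mp hy with rfl | hyt
        · exact hbxs y List.mem_cons_self
        · exact hbacc y hyt
      · exact fun x' hx' => hbxs x' (List.mem_cons_of_mem _ hx')
      · exact hpxs.2
      · intro y hy x' hx'
        rcases (PySem.List.mem_insertBy _ _ _ _).mp hy with rfl | hyt
        · exact hpxs.1 x' hx'
        · exact hlt y hyt x' (List.mem_cons_of_mem _ hx')

theorem pvSorted_pairwise (k : Int → Int) (xs : List Int)
    (hxs : xs.Pairwise (· < ·)) (hb : ∀ x ∈ xs, 0 < x ∧ x < 39) :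
    (PySem.List.sorted xs k false).Pairwise (fun a b => k a * 39 + a < k b * 39 + b) := by
  rw [PySem.List.sorted_eq_foldl_insertBy]
  exact pvFoldl_insertBy_pairwise k xs [] (by simp) (by simp) hb hxs (by simp)

-- ---- peel: permutation and strict pairwise order ----

theorem pvPeel_nil (key : Int → Int) : pvPeel key [] = [] := by
  unfold pvPeel
  rfl

theorem pvPeel_cons (key : Int → Int) (c : Int) (cs : List Int) :
    pvPeel key (c :: cs) =
      ((c :: cs).filter (fun n => key n == cs.foldl (fun acc n => max acc (key n)) (key c)))
        ++ pvPeel key ((c :: cs).filter (fun n => !(key n == cs.foldl (fun acc n => max acc (key n)) (key c)))) := by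
  conv_lhs => unfold pvPeel

theorem pvPeel_perm (key : Int → Int) : ∀ cands : List Int, (pvPeel key cands).Perm cands
  | [] => by rw [pvPeel_nil]
  | c :: cs => by
      rw [pvPeel_cons]
      exact ((pvPeel_perm key _).append_left _).trans (List.filter_append_perm _ _)
termination_by cands => cands.length
decreasing_by exact pvFilterNe_lt key c cs

theorem pvPeel_pairwise (key : Int → Int) :
    ∀ cands : List Int, cands.Pairwise (· < ·) → (∀ x ∈ cands, 0 < x ∧ x < 39) →
      (pvPeel key cands).Pairwise (fun a b => -(key a) * 39 + a < -(key b) * 39 + b)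
  | [] => by intro _ _; rw [pvPeel_nil]; exact List.Pairwise.nil
  | c :: cs => by
      intro hp hb
      rw [pvPeel_cons]
      have hmax := PySem.List.le_foldl_max_int cs key (key c)
      apply List.pairwise_append.mpr
      refine ⟨?_, ?_, ?_⟩
      · refine (hp.filter _).imp_of_mem ?_
        intro a b ha hb' hab
        rw [List.mem_filter] at ha hb'
        have hka : key a = cs.foldl (fun acc n => max acc (key n)) (key c) := by simpa using ha.2
        have hkb : key b = cs.foldl (fun acc n => max acc (key n)) (key c) := by simpa using hb'.2
        have hba := hb a ha.1
        have hbb := hb b hb'.1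
        rw [hka, hkb]
        omega
      · exact pvPeel_pairwise key _ (hp.filter _)
          (fun x hx => hb x (List.mem_filter.mp hx).1)
      · intro a ha b hbm
        rw [List.mem_filter] at ha
        have hbmem := ((pvPeel_perm key _).mem_iff).mp hbm
        rw [List.mem_filter] at hbmem
        have hka : key a = cs.foldl (fun acc n => max acc (key n)) (key c) := by simpa using ha.2
        have hkb : ¬ (key b = cs.foldl (fun acc n => max acc (key n)) (key c)) := by simpa using hbmem.2
        have hble : key b ≤ cs.foldl (fun acc n => max acc (key n)) (key c) := by
          rcases List.mem_cons.mp hbmem.1 with rfl | hbcs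
          · exact hmax.1
          · exact hmax.2 _ hbcs
        have hba := hb a ha.1
        have hbb := hb b hbmem.1
        rw [hka]
        omega
termination_by cands => cands.length
decreasing_by all_goals exact pvFilterNe_lt key c cs

-- A's stable ascending key-sort of an ascending candidate list is B's peel whenever
-- the sort key agrees with -(peel key) on the candidates.
theorem pvSorted_eq_peel (kA g : Int → Int) (xs : List Int)
    (hxs : xs.Pairwise (· < ·)) (hb : ∀ x ∈ xs, 0 < x ∧ x < 39)
    (hk : ∀ x ∈ xs, kA x = -(g x)) :
    PySem.List.sorted xs kA false = pvPeel g xs := by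
  refine List.Perm.eq_of_pairwise (le := fun a b => -(g a) * 39 + a < -(g b) * 39 + b)
    (fun a b _ _ h1 h2 => by omega) ?_ (pvPeel_pairwise g xs hxs hb)
    ((PySem.List.sorted_perm xs kA false).trans (pvPeel_perm g xs).symm)
  refine (pvSorted_pairwise kA xs hxs hb).imp_of_mem ?_
  intro a b ha hb' hab
  rw [PySem.List.mem_sorted] at ha hb'
  have h1 := hk a ha
  have h2 := hk b hb'
  omega

-- ---- counting: Counter of the flattened window vs per-draw count sum ----

theorem pvCount_flat (recent : List (List (String × List Int))) (x : Int) (hx : x ≤ 38) :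
    ((recent.flatMap (fun d => (pvNums d).filter (fun n => decide (n ≤ 38)))).count x : Int)
      = (recent.map (fun d => ((pvNums d).count x : Int))).sum := by
  induction recent with
  | nil => simp
  | cons d ds ih =>
      simp only [List.flatMap_cons, List.count_append, List.map_cons, List.sum_cons]
      rw [List.count_filter (by simpa using hx)]
      push_cast
      rw [ih]

-- ---- the fallback branch ----

theorem pvEchoCold_eq (history : List (List (String × List Int))) (exclude : List Int) :
    pvEchoCold history exclude = pvCold history exclude := by
  simp only [pvEchoCold, pvCold]
  set echo := (if 2 ≤ (history.length : Int) then
      (pvNums ((PySem.List.pyGet? history (-2)).getD [])).filter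
        (fun n => decide (n ≤ 38) && !(decide (n ∈ exclude)))
    else []) with hecho
  set recent := PySem.List.slice history (some (-100)) none with hrec
  set remaining := (PySem.List.pyRange 1 39 1).filter
    (fun n => !(decide (n ∈ exclude)) && !(decide (n ∈ echo))) with hrem
  have hS : PySem.List.sorted remaining
      (fun x => PySem.Dict.getD
        (PySem.Dict.counter (recent.flatMap (fun d => (pvNums d).filter (fun n => decide (n ≤ 38))))) x 0) false
      = pvPeel (fun n => -((recent.map (fun d => ((pvNums d).count n : Int))).sum)) remaining := by
    apply pvSorted_eq_peel
    · exact pvRange139_pairwise.filter _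
    · exact fun x hx => pvRange139 x (List.mem_filter.mp hx).1
    · intro x hx
      have hx39 := pvRange139 x (List.mem_filter.mp hx).1
      show PySem.Dict.getD _ x 0 = _
      rw [PySem.Dict.getD_counter, neg_neg]
      exact pvCount_flat recent x (by omega)
  rw [hS]

-- ===== VERDICT (by name: the statement is the Claim_ definition above) =====
theorem bet3_z3_gap_spec : Claim_equal_bet3_z3_gap := by
  intro history exclude lookback _ _
  show bet3_z3_gap history exclude lookback = bet3_z3_gap_alt history exclude lookback
  simp only [bet3_z3_gap, bet3_z3_gap_alt]
  by_cases hz : (PySem.List.pyRange 26 39 1).filter (fun n => !(decide (n ∈ exclude))) = []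
  · rw [if_pos hz, if_pos hz]
    exact pvEchoCold_eq history exclude
  · rw [if_neg hz, if_neg hz]
    set recent := (if lookback ≤ (history.length : Int) then PySem.List.slice history (some (-lookback)) none else history) with hrecent
    set z3 := (PySem.List.pyRange 26 39 1).filter (fun n => !(decide (n ∈ exclude))) with hz3
    set LS := (PySem.List.enumerate recent).foldl
      (fun ls p => (pvNums p.2).foldl (fun ls n => if n ≤ 38 then ls.insert n p.1 else ls) ls)
      PySem.Dict.empty with hLS
    have hkeyAll : ∀ (xs : List Int), (∀ x ∈ xs, 0 < x ∧ x < 39) → ∀ x ∈ xs,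
        (PySem.Dict.getD
          (xs.foldl (fun g n =>
              if LS.contains n then g.insert n ((recent.length : Int) - 1 - PySem.Dict.getD LS n 0)
              else g.insert n ((recent.length : Int)))
            PySem.Dict.empty) x 0)
        = pvGap recent.reverse x 0 := by
      intro xs hbnd x hx
      have hx38 : x ≤ 38 := by have := hbnd x hx; omega
      apply pvGapsDict_getD (L := (recent.length : Int)) (gapf := fun n => pvGap recent.reverse n 0)
      · rw [hLS]
        have hg := pvLastSeen_get? recent x hx38 0 PySem.Dict.empty
        simpa [PySem.Dict.get?, PySem.Dict.empty] using hg
      · have hg := pvGap_bounds recent.reverse x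
        simpa [List.length_reverse] using hg
      · exact hx
    have hS1 : PySem.List.sorted z3
        (fun x => -(PySem.Dict.getD
          (z3.foldl (fun g n =>
              if LS.contains n then g.insert n ((recent.length : Int) - 1 - PySem.Dict.getD LS n 0)
              else g.insert n ((recent.length : Int)))
            PySem.Dict.empty) x 0)) false
        = pvPeel (fun n => pvGap recent.reverse n 0) z3 := by
      apply pvSorted_eq_peel
      · exact pvRange2639_pairwise.filter _
      · exact fun x hx => pvRange2639 x (List.mem_filter.mp hx).1
      · intro x hx
        have hk := hkeyAll z3 (fun x' hx' => pvRange2639 x' (List.mem_filter.mp hx').1) x hx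
        simp only [hk]
    rw [hS1]
    set bet := PySem.List.slice (pvPeel (fun n => pvGap recent.reverse n 0) z3) none (some 6) with hbet
    by_cases hlen : bet.length < 6
    · rw [if_pos hlen, if_pos hlen]
      have h2 : (PySem.List.pyRange 1 39 1).filter
            (fun n => !(decide (n ∈ exclude)) && !(decide (n ∈ PySem.Set.ofList bet)))
          = (PySem.List.pyRange 1 39 1).filter
            (fun n => !(decide (n ∈ exclude)) && !(decide (n ∈ bet))) :=
        List.filter_congr (fun x _ => by rw [pvMem_ofList])
      rw [h2]
      set rest := (PySem.List.pyRange 1 39 1).filter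
        (fun n => !(decide (n ∈ exclude)) && !(decide (n ∈ bet))) with hrest
      have hS2 : PySem.List.sorted rest
          (fun x => -(PySem.Dict.getD
            (rest.foldl (fun g n =>
                if LS.contains n then g.insert n ((recent.length : Int) - 1 - PySem.Dict.getD LS n 0)
                else g.insert n ((recent.length : Int)))
              PySem.Dict.empty) x 0)) false
          = pvPeel (fun n => pvGap recent.reverse n 0) rest := by
        apply pvSorted_eq_peel
        · exact pvRange139_pairwise.filter _
        · exact fun x hx => pvRange139 x (List.mem_filter.mp hx).1
        · intro x hx
          have hk := hkeyAll rest (fun x' hx' => pvRange139 x' (List.mem_filter.mp hx').1) x hx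
          simp only [hk]
      rw [hS2]
    · rw [if_neg hlen, if_neg hlen]
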